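-- pv_equiv track=rewrite | github.com/Akach4n/python_ex | EjcsListas/ej7.py | contar_vocales_consonantes
-- ===== SOURCE A (Python) =====
-- def contar_vocales_consonantes(texto):
--     consonantes = set()
--     vocales = set()
--     for letra in texto:
--         if letra not in ["a", "e", "i", "o", "u", " "]:
--             consonantes.add(letra)
--         else:
--             vocales.add(letra)
--     return f"{len(consonantes)} consonantes y {len(vocales)} vocales"
-- ===== SOURCE B (Python) =====
-- def contar_vocales_consonantes(texto):
--     distinct = len(set(texto))
--     vocales = sum(ch in texto for ch in "aeiou ")
--     return f"{distinct - vocales} consonantes y {vocales} vocales"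
-- ===== Notes on version B (the rewrite author's own statement) =====
-- stated objective: alternative
-- what changed: Instead of classifying every character of the text into two sets with a per-character branch, B counts the distinct characters once with len(set(texto)), probes only the six fixed vowel/space candidates for presence in the text, and obtains the consonant count by subtraction; the classification loop and the consonant set disappear.
import Mathlib
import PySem

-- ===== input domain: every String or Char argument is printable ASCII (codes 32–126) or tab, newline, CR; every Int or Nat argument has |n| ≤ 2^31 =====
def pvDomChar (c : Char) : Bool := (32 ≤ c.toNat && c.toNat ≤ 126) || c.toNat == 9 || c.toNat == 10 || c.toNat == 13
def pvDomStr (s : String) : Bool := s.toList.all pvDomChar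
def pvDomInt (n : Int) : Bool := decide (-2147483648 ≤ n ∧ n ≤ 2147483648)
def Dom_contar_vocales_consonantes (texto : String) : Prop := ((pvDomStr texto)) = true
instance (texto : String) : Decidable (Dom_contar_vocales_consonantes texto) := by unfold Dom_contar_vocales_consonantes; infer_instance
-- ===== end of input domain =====

-- B counts the distinct characters once, probes only the six fixed vowel/space candidates
-- for presence in the text, and gets the consonant count by subtraction (alternative decomposition; a timing run measured B faster by a constant factor).

-- ===== PORT A =====
def contar_vocales_consonantes (texto : String) : String :=
  let st := texto.toList.foldl
    (fun (p : PySem.Set Char × PySem.Set Char) letra =>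
      if letra ∉ ['a', 'e', 'i', 'o', 'u', ' '] then (PySem.Set.add p.1 letra, p.2)
      else (p.1, PySem.Set.add p.2 letra))
    (PySem.Set.empty, PySem.Set.empty)
  PySem.Int.toStr (PySem.Set.len st.1) ++ " consonantes y " ++ PySem.Int.toStr (PySem.Set.len st.2) ++ " vocales"

-- ===== PORT B =====
-- 'ch in texto' on a one-character ch is exactly membership of that character in the text.
def contar_vocales_consonantes_alt (texto : String) : String :=
  let distinct : Int := PySem.Set.len (PySem.Set.ofList texto.toList)
  let vocales : Int := "aeiou ".toList.foldl
    (fun acc ch => acc + (if ch ∈ texto.toList then 1 else 0)) 0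
  PySem.Int.toStr (distinct - vocales) ++ " consonantes y " ++ PySem.Int.toStr vocales ++ " vocales"

-- ===== PRECONDITION & SPEC =====
def Spec_contar_vocales_consonantes (texto : String) (out : String) : Prop := out = contar_vocales_consonantes_alt texto
instance (texto : String) (out : String) : Decidable (Spec_contar_vocales_consonantes texto out) := by unfold Spec_contar_vocales_consonantes; infer_instance

-- ===== CLAIM (what is proved, stated in full; the proofs are below) =====
def Claim_equal_contar_vocales_consonantes : Prop := ∀ (texto : String), Dom_contar_vocales_consonantes texto → Spec_contar_vocales_consonantes texto (contar_vocales_consonantes texto)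

-- ===== LEMMAS AND PROOFS =====

-- A's loop splits the input into conditional `add`s: its final pair is the pair of
-- `update`s over the two filtered sublists.
theorem pv_foldA (l : List Char) (c v : PySem.Set Char) :
    l.foldl
      (fun (p : PySem.Set Char × PySem.Set Char) letra =>
        if letra ∉ ['a', 'e', 'i', 'o', 'u', ' '] then (PySem.Set.add p.1 letra, p.2)
        else (p.1, PySem.Set.add p.2 letra))
      (c, v)
    = (PySem.Set.update c (l.filter (fun x => x ∉ ['a', 'e', 'i', 'o', 'u', ' '])),
       PySem.Set.update v (l.filter (fun x => x ∈ ['a', 'e', 'i', 'o', 'u', ' ']))) := by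
  induction l generalizing c v with
  | nil => simp [PySem.Set.update]
  | cons x xs ih =>
    by_cases hx : x ∈ ['a', 'e', 'i', 'o', 'u', ' ']
    · rw [List.foldl_cons, if_neg (not_not_intro hx), ih,
        List.filter_cons_of_neg (by simp at hx ⊢; tauto),
        List.filter_cons_of_pos (by simp at hx ⊢; tauto), PySem.Set.update_cons]
    · rw [List.foldl_cons, if_pos hx, ih,
        List.filter_cons_of_pos (by simp at hx ⊢; tauto),
        List.filter_cons_of_neg (by simp at hx ⊢; tauto), PySem.Set.update_cons]

-- B's summing fold counts the probes that succeed.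
theorem pv_foldB (vs l : List Char) (a : Int) :
    vs.foldl (fun acc ch => acc + (if ch ∈ l then 1 else 0)) a
      = a + ((vs.filter (fun ch => ch ∈ l)).length : Int) := by
  induction vs generalizing a with
  | nil => simp
  | cons x xs ih =>
    by_cases hx : x ∈ l
    · simp [hx, ih]; ring
    · simp [hx, ih]

-- Two Nodup lists with the same members have the same length.
theorem pv_len_eq_of_same_mem {α : Type} (s t : List α) (hs : s.Nodup) (ht : t.Nodup)
    (h : ∀ x, x ∈ s ↔ x ∈ t) : s.length = t.length :=
  ((List.perm_ext_iff_of_nodup hs ht).mpr h).length_eq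

-- The distinct vowels/spaces occurring in l are exactly the candidates of V present in l.
theorem pv_voc_len (l : List Char) :
    (PySem.Set.ofList (l.filter (fun x => x ∈ ['a', 'e', 'i', 'o', 'u', ' ']))).length
      = ("aeiou ".toList.filter (fun ch => ch ∈ l)).length := by
  apply pv_len_eq_of_same_mem _ _ (PySem.Set.nodup_ofList _)
    ((by decide : ("aeiou ".toList : List Char).Nodup).filter _)
  have hlist : "aeiou ".toList = ['a', 'e', 'i', 'o', 'u', ' '] := rfl
  rw [hlist]
  intro x
  simp [PySem.Set.mem_ofList, List.mem_filter, and_comm]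

-- The distinct characters of l split into distinct consonants plus distinct vowels/spaces.
theorem pv_split_len (l : List Char) :
    (PySem.Set.ofList l).length
      = (PySem.Set.ofList (l.filter (fun x => x ∉ ['a', 'e', 'i', 'o', 'u', ' ']))).length
        + (PySem.Set.ofList (l.filter (fun x => x ∈ ['a', 'e', 'i', 'o', 'u', ' ']))).length := by
  have hc : (PySem.Set.ofList (l.filter (fun x => x ∉ ['a', 'e', 'i', 'o', 'u', ' ']))).length
      = ((PySem.Set.ofList l).filter (fun x => x ∉ ['a', 'e', 'i', 'o', 'u', ' '])).length := by
    apply pv_len_eq_of_same_mem _ _ (PySem.Set.nodup_ofList _)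
      ((PySem.Set.nodup_ofList l).filter _)
    intro x
    simp [PySem.Set.mem_ofList, List.mem_filter, and_comm]
  have hv : (PySem.Set.ofList (l.filter (fun x => x ∈ ['a', 'e', 'i', 'o', 'u', ' ']))).length
      = ((PySem.Set.ofList l).filter (fun x => x ∈ ['a', 'e', 'i', 'o', 'u', ' '])).length := by
    apply pv_len_eq_of_same_mem _ _ (PySem.Set.nodup_ofList _)
      ((PySem.Set.nodup_ofList l).filter _)
    intro x
    simp [PySem.Set.mem_ofList, List.mem_filter, and_comm]
  rw [hc, hv]
  rw [List.length_eq_length_filter_add (l := PySem.Set.ofList l)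
    (fun x => decide (x ∉ ['a', 'e', 'i', 'o', 'u', ' ']))]
  congr 1
  simp

-- ===== VERDICT (by name: the statement is the Claim_ definition above) =====
theorem contar_vocales_consonantes_spec : Claim_equal_contar_vocales_consonantes := by
  intro texto _
  unfold Spec_contar_vocales_consonantes contar_vocales_consonantes contar_vocales_consonantes_alt
  rw [pv_foldA, pv_foldB]
  simp only [PySem.Set.update_empty, PySem.Set.len]
  have hv := pv_voc_len texto.toList
  have hs := pv_split_len texto.toList
  have h1 : ((PySem.Set.ofList (texto.toList.filter (fun x => x ∉ ['a', 'e', 'i', 'o', 'u', ' ']))).length : Int)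
      = ((PySem.Set.ofList texto.toList).length : Int)
        - (0 + (("aeiou ".toList.filter (fun ch => ch ∈ texto.toList)).length : Int)) := by omega
  have h2 : ((PySem.Set.ofList (texto.toList.filter (fun x => x ∈ ['a', 'e', 'i', 'o', 'u', ' ']))).length : Int)
      = 0 + (("aeiou ".toList.filter (fun ch => ch ∈ texto.toList)).length : Int) := by omega
  rw [h1, h2]
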